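-- pv_equiv track=rewrite | github.com/facebookresearch/TaBERT | preprocess/htmltable.py | are_mergeable
-- ===== SOURCE A (Python) =====
-- def are_mergeable(col1, col2):
--     assert len(col1) == len(col2)
--     merged = []
--     for i in range(len(col1)):
--         c1, c2 = col1[i], col2[i]
--         if not c1[1]:
--             merged.append(c2)
--         elif not c2[1] or c1 == c2:
--             merged.append(c1)
--         else:
--             return None
--     return merged
-- ===== SOURCE B (Python) =====
-- def are_mergeable(col1, col2):
--     assert len(col1) == len(col2)
--     if not all(not c1[1] or not c2[1] or c1 == c2 for c1, c2 in zip(col1, col2)):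
--         return None
--     return [c2 if not c1[1] else c1 for c1, c2 in zip(col1, col2)]
-- ===== Notes on version B (the rewrite author's own statement) =====
-- stated objective: simpler
-- what changed: Replaces the single interleaved index loop with early return by a validate-then-build decomposition: one all() pass over zip(col1,col2) decides mergeability, then a comprehension builds the merged column.
import Mathlib
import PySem

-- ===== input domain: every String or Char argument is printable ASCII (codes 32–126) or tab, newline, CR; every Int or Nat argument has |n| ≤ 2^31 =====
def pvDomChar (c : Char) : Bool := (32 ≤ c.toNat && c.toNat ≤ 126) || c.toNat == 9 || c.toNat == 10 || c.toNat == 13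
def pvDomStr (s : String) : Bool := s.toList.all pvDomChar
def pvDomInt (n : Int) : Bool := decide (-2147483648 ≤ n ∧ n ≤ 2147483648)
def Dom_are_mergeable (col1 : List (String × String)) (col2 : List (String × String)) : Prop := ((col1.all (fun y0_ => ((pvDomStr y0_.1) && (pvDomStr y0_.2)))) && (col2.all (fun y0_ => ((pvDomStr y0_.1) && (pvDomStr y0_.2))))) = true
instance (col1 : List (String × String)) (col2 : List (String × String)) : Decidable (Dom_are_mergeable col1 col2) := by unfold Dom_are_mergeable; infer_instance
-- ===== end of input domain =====

-- B separates validation (one all-pass over the zipped columns) from construction (a map), replacing A's single interleaved loop with early return; same O(n) cost.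


-- ===== PORT A =====
-- A's index loop 'for i in range(len(col1))' with the accumulating 'merged' list and
-- early 'return None'; indexing is totalized with getD, exact on Pre_ (equal lengths,
-- so every index is in range).
def are_mergeable_go (col1 : List (String × String)) (col2 : List (String × String))
    (i : Nat) (merged : List (String × String)) : Option (List (String × String)) :=
  if _h : i < col1.length then
    let c1 := col1.getD i ("", "")
    let c2 := col2.getD i ("", "")
    if c1.2 = "" then
      are_mergeable_go col1 col2 (i + 1) (merged ++ [c2])
    else if c2.2 = "" ∨ c1 = c2 then
      are_mergeable_go col1 col2 (i + 1) (merged ++ [c1])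
    else
      none
  else
    some merged
termination_by col1.length - i
decreasing_by all_goals omega

def are_mergeable (col1 : List (String × String)) (col2 : List (String × String)) :
    Option (List (String × String)) :=
  -- assert len(col1) == len(col2): raising inputs excluded by Pre_are_mergeable
  are_mergeable_go col1 col2 0 []

-- ===== PORT B =====
def are_mergeable_alt (col1 : List (String × String)) (col2 : List (String × String)) :
    Option (List (String × String)) :=
  -- assert len(col1) == len(col2): raising inputs excluded by Pre_are_mergeable
  if ((col1.zip col2).all (fun p => p.1.2 = "" || p.2.2 = "" || p.1 = p.2)) then
    some ((col1.zip col2).map (fun p => if p.1.2 = "" then p.2 else p.1))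
  else
    none

-- ===== PRECONDITION & SPEC =====
-- Pre_ excludes exactly the inputs where A's 'assert len(col1) == len(col2)' raises AssertionError.
def Pre_are_mergeable (col1 : List (String × String)) (col2 : List (String × String)) : Prop :=
  col1.length = col2.length
instance (col1 : List (String × String)) (col2 : List (String × String)) : Decidable (Pre_are_mergeable col1 col2) := by unfold Pre_are_mergeable; infer_instance

def pvWitness_are_mergeable : (List (String × String)) × (List (String × String)) :=
  ([("a", ""), ("b", "x")], [("c", "y"), ("b", "x")])

def Spec_are_mergeable (col1 : List (String × String)) (col2 : List (String × String)) (out : Option (List (String × String))) : Prop := out = are_mergeable_alt col1 col2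
instance (col1 : List (String × String)) (col2 : List (String × String)) (out : Option (List (String × String))) : Decidable (Spec_are_mergeable col1 col2 out) := by unfold Spec_are_mergeable; infer_instance

-- ===== CLAIM (what is proved, stated in full; the proofs are below) =====
def Claim_equal_are_mergeable : Prop := ∀ (col1 : List (String × String)) (col2 : List (String × String)), Dom_are_mergeable col1 col2 → Pre_are_mergeable col1 col2 → Spec_are_mergeable col1 col2 (are_mergeable col1 col2)

-- ===== LEMMAS AND PROOFS =====

-- Invariant for A's loop: from index i on, it returns B's verdict on the dropped suffix,
-- prefixed by the accumulated 'merged'.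
theorem are_mergeable_go_eq (col1 col2 : List (String × String))
    (hlen : col1.length = col2.length) (i : Nat) (merged : List (String × String)) :
    are_mergeable_go col1 col2 i merged =
      (if (((col1.drop i).zip (col2.drop i)).all (fun p => p.1.2 = "" || p.2.2 = "" || p.1 = p.2)) then
        some (merged ++ ((col1.drop i).zip (col2.drop i)).map (fun p => if p.1.2 = "" then p.2 else p.1))
      else none) := by
  by_cases h : i < col1.length
  · have h2 : i < col2.length := by omega
    have hd1 : col1.drop i = col1[i] :: col1.drop (i + 1) := List.drop_eq_getElem_cons h
    have hd2 : col2.drop i = col2[i] :: col2.drop (i + 1) := List.drop_eq_getElem_cons h2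
    have ih := are_mergeable_go_eq col1 col2 hlen (i + 1)
    rw [are_mergeable_go]
    simp only [h, dif_pos, List.getD_eq_getElem?_getD, List.getElem?_eq_getElem h,
      List.getElem?_eq_getElem h2, Option.getD_some, hd1, hd2, List.zip_cons_cons,
      List.all_cons, List.map_cons]
    by_cases hc1 : (col1[i]).2 = ""
    · have hq : (decide ((col1[i]).2 = "") || decide ((col2[i]).2 = "") || decide (col1[i] = col2[i])) = true := by
        simp [hc1]
      rw [if_pos hc1, ih (merged ++ [col2[i]])]
      simp only [hq, Bool.true_and, if_pos hc1]
      split_ifs <;> simp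
    · by_cases hc2 : (col2[i]).2 = "" ∨ col1[i] = col2[i]
      · have hq : (decide ((col1[i]).2 = "") || decide ((col2[i]).2 = "") || decide (col1[i] = col2[i])) = true := by
          rcases hc2 with hc2 | hc2 <;> simp [hc2]
        rw [if_neg hc1, if_pos hc2, ih (merged ++ [col1[i]])]
        simp only [hq, Bool.true_and, if_neg hc1]
        split_ifs <;> simp
      · rw [if_neg hc1, if_neg hc2]
        have h1 : ¬ (col2[i]).2 = "" := fun h => hc2 (Or.inl h)
        have h2 : ¬ col1[i] = col2[i] := fun h => hc2 (Or.inr h)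
        simp [hc1, h1, h2]
  · have h2 : ¬ i < col2.length := by omega
    rw [are_mergeable_go]
    simp [h, List.drop_eq_nil_of_le (by omega : col1.length ≤ i)]
termination_by col1.length - i
decreasing_by omega

-- ===== VERDICT (by name: the statement is the Claim_ definition above) =====
theorem are_mergeable_spec : Claim_equal_are_mergeable := by
  intro col1 col2 _ hpre
  unfold Spec_are_mergeable are_mergeable are_mergeable_alt
  rw [are_mergeable_go_eq col1 col2 hpre 0 []]
  simp
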